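-- pv_equiv track=rewrite | github.com/biyualkantara/SIP_posyandu1 | ai/app.py | rekomendasi_prioritas
-- ===== SOURCE A (Python) =====
-- def rekomendasi_prioritas(defisit: dict, umur_bulan: int) -> list:
--     # rekomendasi berbasis defisit prediksi (bukan rumus WHO)
--     kandidat = []
--
--     if defisit.get("defisit_protein") == 1:
--         kandidat += ["telur", "ikan", "tempe", "ayam"]
--     if defisit.get("defisit_energi") == 1:
--         kandidat += ["nasi tim", "kentang", "ubi", "bubur kacang hijau"]
--     if defisit.get("defisit_zat_besi") == 1:
--         kandidat += ["hati ayam (porsi kecil)", "bayam", "daging sapi (cincang)"]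
--     if defisit.get("defisit_zink") == 1:
--         kandidat += ["ikan", "telur", "kacang-kacangan"]
--     if defisit.get("defisit_vitA") == 1:
--         kandidat += ["wortel", "labu", "pepaya"]
--
--     # rapikan + batasi
--     seen = set()
--     out = []
--     for x in kandidat:
--         if x not in seen:
--             out.append(x)
--             seen.add(x)
--     if not out:
--         out = ["pola makan seimbang sesuai umur"]
--
--     return out[:8]
-- ===== SOURCE B (Python) =====
-- _TABEL = [
--     ("defisit_protein", ["telur", "ikan", "tempe", "ayam"]),
--     ("defisit_energi", ["nasi tim", "kentang", "ubi", "bubur kacang hijau"]),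
--     ("defisit_zat_besi", ["hati ayam (porsi kecil)", "bayam", "daging sapi (cincang)"]),
--     ("defisit_zink", ["ikan", "telur", "kacang-kacangan"]),
--     ("defisit_vitA", ["wortel", "labu", "pepaya"]),
-- ]
--
-- def _tambah(foods, acc):
--     # append each new food to the output, stopping once the 8-item cap is reached
--     for f in foods:
--         if len(acc) == 8:
--             break
--         if f not in acc:
--             acc = acc + [f]
--     return acc
--
-- def rekomendasi_prioritas(defisit: dict, umur_bulan: int) -> list:
--     def go(table, acc):
--         if not table:
--             return acc
--         key, foods = table[0]
--         if defisit.get(key) == 1: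
--             acc = _tambah(foods, acc)
--         return go(table[1:], acc)
--     out = go(_TABEL, [])
--     return out if out else ["pola makan seimbang sesuai umur"]
-- ===== Notes on version B (the rewrite author's own statement) =====
-- stated objective: alternative
-- what changed: Single fused recursive pass over a (key, foods) table that deduplicates each food directly against the output built so far and stops at the 8-item cap, instead of A's staged pipeline of building a candidate list, a seen-set dedup loop, fallback, and a final [:8] slice.
import Mathlib
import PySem

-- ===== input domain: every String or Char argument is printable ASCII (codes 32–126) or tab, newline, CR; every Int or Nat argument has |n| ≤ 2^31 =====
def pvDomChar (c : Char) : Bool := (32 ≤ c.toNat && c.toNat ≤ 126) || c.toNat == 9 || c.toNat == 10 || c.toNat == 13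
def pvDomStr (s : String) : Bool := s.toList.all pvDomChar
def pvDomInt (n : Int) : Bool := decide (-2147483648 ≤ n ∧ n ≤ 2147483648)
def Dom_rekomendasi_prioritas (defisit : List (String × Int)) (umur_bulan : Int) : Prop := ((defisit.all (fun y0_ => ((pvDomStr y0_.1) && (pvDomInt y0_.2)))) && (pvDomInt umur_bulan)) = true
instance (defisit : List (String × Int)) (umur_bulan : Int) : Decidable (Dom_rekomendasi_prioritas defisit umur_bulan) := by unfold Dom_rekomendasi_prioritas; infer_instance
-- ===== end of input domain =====

-- B is a single fused recursive table walk that dedups against the output built so far and stops at the 8-item cap, replacing A's staged build/dedup/fallback/slice pipeline (alternative decomposition, same cost).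

-- ===== PORT A =====
def rekomendasi_prioritas (defisit : List (String × Int)) (umur_bulan : Int) : List String :=
  let d := PySem.Dict.mk defisit
  let kandidat : List String := []
  let kandidat := if d.get? "defisit_protein" == some 1 then kandidat ++ ["telur", "ikan", "tempe", "ayam"] else kandidat
  let kandidat := if d.get? "defisit_energi" == some 1 then kandidat ++ ["nasi tim", "kentang", "ubi", "bubur kacang hijau"] else kandidat
  let kandidat := if d.get? "defisit_zat_besi" == some 1 then kandidat ++ ["hati ayam (porsi kecil)", "bayam", "daging sapi (cincang)"] else kandidat
  let kandidat := if d.get? "defisit_zink" == some 1 then kandidat ++ ["ikan", "telur", "kacang-kacangan"] else kandidat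
  let kandidat := if d.get? "defisit_vitA" == some 1 then kandidat ++ ["wortel", "labu", "pepaya"] else kandidat
  let so := kandidat.foldl (fun (p : PySem.Set String × List String) x =>
      if !(PySem.Set.contains p.1 x) then (PySem.Set.add p.1 x, p.2 ++ [x]) else p)
    (PySem.Set.empty, [])
  let out := if so.2 = [] then ["pola makan seimbang sesuai umur"] else so.2
  PySem.List.slice out none (some 8)

-- ===== PORT B =====
def tabelGizi : List (String × List String) :=
  [("defisit_protein", ["telur", "ikan", "tempe", "ayam"]),
   ("defisit_energi", ["nasi tim", "kentang", "ubi", "bubur kacang hijau"]),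
   ("defisit_zat_besi", ["hati ayam (porsi kecil)", "bayam", "daging sapi (cincang)"]),
   ("defisit_zink", ["ikan", "telur", "kacang-kacangan"]),
   ("defisit_vitA", ["wortel", "labu", "pepaya"])]

-- _tambah: append each new food to the output, stopping once the 8-item cap is reached
def tambah : List String → List String → List String
  | [], acc => acc
  | f :: fs, acc =>
      if acc.length = 8 then acc
      else if f ∈ acc then tambah fs acc
      else tambah fs (acc ++ [f])

-- go: recursive walk over the remaining table
def goRekom (d : PySem.Dict String Int) : List (String × List String) → List String → List String
  | [], acc => acc
  | (key, foods) :: rest, acc =>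
      let acc := if d.get? key == some 1 then tambah foods acc else acc
      goRekom d rest acc

def rekomendasi_prioritas_alt (defisit : List (String × Int)) (umur_bulan : Int) : List String :=
  let d := PySem.Dict.mk defisit
  let out := goRekom d tabelGizi []
  if out = [] then ["pola makan seimbang sesuai umur"] else out

-- ===== PRECONDITION & SPEC =====
def Spec_rekomendasi_prioritas (defisit : List (String × Int)) (umur_bulan : Int) (out : List String) : Prop := out = rekomendasi_prioritas_alt defisit umur_bulan
instance (defisit : List (String × Int)) (umur_bulan : Int) (out : List String) : Decidable (Spec_rekomendasi_prioritas defisit umur_bulan out) := by unfold Spec_rekomendasi_prioritas; infer_instance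

-- ===== CLAIM (what is proved, stated in full; the proofs are below) =====
def Claim_equal_rekomendasi_prioritas : Prop := ∀ (defisit : List (String × Int)) (umur_bulan : Int), Dom_rekomendasi_prioritas defisit umur_bulan → Spec_rekomendasi_prioritas defisit umur_bulan (rekomendasi_prioritas defisit umur_bulan)

-- ===== LEMMAS AND PROOFS =====

-- Both ports depend on the input only through the five Boolean flag tests; with those
-- abstracted, equality is a finite check over the 32 flag combinations.
theorem pvCore_eq (b1 b2 b3 b4 b5 : Bool) :
    (let kandidat : List String := []
     let kandidat := if b1 then kandidat ++ ["telur", "ikan", "tempe", "ayam"] else kandidat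
     let kandidat := if b2 then kandidat ++ ["nasi tim", "kentang", "ubi", "bubur kacang hijau"] else kandidat
     let kandidat := if b3 then kandidat ++ ["hati ayam (porsi kecil)", "bayam", "daging sapi (cincang)"] else kandidat
     let kandidat := if b4 then kandidat ++ ["ikan", "telur", "kacang-kacangan"] else kandidat
     let kandidat := if b5 then kandidat ++ ["wortel", "labu", "pepaya"] else kandidat
     let so := kandidat.foldl (fun (p : PySem.Set String × List String) x =>
         if !(PySem.Set.contains p.1 x) then (PySem.Set.add p.1 x, p.2 ++ [x]) else p)
       (PySem.Set.empty, [])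
     let out := if so.2 = [] then ["pola makan seimbang sesuai umur"] else so.2
     PySem.List.slice out none (some 8))
  = (let acc : List String := []
     let acc := if b1 then tambah ["telur", "ikan", "tempe", "ayam"] acc else acc
     let acc := if b2 then tambah ["nasi tim", "kentang", "ubi", "bubur kacang hijau"] acc else acc
     let acc := if b3 then tambah ["hati ayam (porsi kecil)", "bayam", "daging sapi (cincang)"] acc else acc
     let acc := if b4 then tambah ["ikan", "telur", "kacang-kacangan"] acc else acc
     let acc := if b5 then tambah ["wortel", "labu", "pepaya"] acc else acc
     if acc = [] then ["pola makan seimbang sesuai umur"] else acc) := by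
  cases b1 <;> cases b2 <;> cases b3 <;> cases b4 <;> cases b5 <;> decide

-- ===== VERDICT (by name: the statement is the Claim_ definition above) =====
theorem rekomendasi_prioritas_spec : Claim_equal_rekomendasi_prioritas := by
  unfold Claim_equal_rekomendasi_prioritas
  intro defisit umur_bulan _
  unfold Spec_rekomendasi_prioritas rekomendasi_prioritas rekomendasi_prioritas_alt
  simp only [tabelGizi, goRekom]
  exact pvCore_eq _ _ _ _ _
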